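-- pv_equiv track=rewrite | github.com/Tanmay53/cohort_3 | submissions/sm_105_ashish/week_14/day_3/new_brick_wall.py | odd_row
-- ===== SOURCE A (Python) =====
-- def odd_row(width):
--     layer  = list()
--     for i in range(width):
--         if i == 0:
--             layer.append('__|__')
--         else:
--             layer.append('_|__')
--     return "".join(layer)
-- ===== SOURCE B (Python) =====
-- def odd_row(width):
--     if width <= 0:
--         return ''
--     # character-level closed form: the row has 4*width+1 characters and a
--     # '|' sits exactly at the positions congruent to 2 mod 4.
--     return ''.join('|' if i % 4 == 2 else '_' for i in range(4 * width + 1))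
-- ===== Notes on version B (the rewrite author's own statement) =====
-- stated objective: alternative
-- what changed: Replaces A's per-column loop appending 5- and 4-character cell strings to a list with a per-character construction: the row is generated one character at a time over range(4*width+1), placing '|' exactly where the index is 2 mod 4.
import Mathlib
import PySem

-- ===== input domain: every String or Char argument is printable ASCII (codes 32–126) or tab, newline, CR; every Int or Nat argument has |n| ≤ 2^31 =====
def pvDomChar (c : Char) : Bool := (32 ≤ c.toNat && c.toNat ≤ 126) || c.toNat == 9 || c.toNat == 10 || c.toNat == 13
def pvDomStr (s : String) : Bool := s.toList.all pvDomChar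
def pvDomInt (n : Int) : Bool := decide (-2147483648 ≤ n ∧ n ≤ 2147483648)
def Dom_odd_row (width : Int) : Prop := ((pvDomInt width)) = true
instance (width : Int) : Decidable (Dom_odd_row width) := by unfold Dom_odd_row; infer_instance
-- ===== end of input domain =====

-- Header: B builds the row one character at a time over range(4*width+1) ('|' exactly at index ≡ 2 mod 4)
-- instead of A's per-column list of cell strings (alternative decomposition; same cost).


-- ===== PORT A =====
def odd_row (width : Int) : String :=
  let layer : List String :=
    (PySem.List.pyRange 0 width 1).foldl
      (fun acc i => acc ++ [if i == 0 then "__|__" else "_|__"]) []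
  PySem.Str.join "" layer

-- ===== PORT B =====
-- the per-character rule of Source B's generator expression ('%' is Python's mod; exact via PySem.Int.mod)
def oddRowChar (i : Int) : Char := if PySem.Int.mod i 4 == 2 then '|' else '_'

def odd_row_alt (width : Int) : String :=
  if width ≤ 0 then ""
  else String.ofList ((PySem.List.pyRange 0 (4 * width + 1) 1).map oddRowChar)

-- ===== PRECONDITION & SPEC =====
def Spec_odd_row (width : Int) (out : String) : Prop := out = odd_row_alt width
instance (width : Int) (out : String) : Decidable (Spec_odd_row width out) := by unfold Spec_odd_row; infer_instance

-- ===== CLAIM (what is proved, stated in full; the proofs are below) =====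
def Claim_equal_odd_row : Prop := ∀ (width : Int), Dom_odd_row width → Spec_odd_row width (odd_row width)

-- ===== LEMMAS AND PROOFS =====

-- A's loop over range(1, b) appends only '_|__' cells
theorem odd_row_loop_tail (n : Nat) (acc : List String) :
    (PySem.List.pyRange 1 (1 + (n : Int)) 1).foldl
      (fun acc i => acc ++ [if i == 0 then "__|__" else "_|__"]) acc
      = acc ++ List.replicate n "_|__" := by
  induction n generalizing acc with
  | zero => simp [PySem.List.pyRange_one_eq_nil]
  | succ k ih =>
    have h : (1 : Int) + (k + 1 : Nat) = (1 + (k : Int)) + 1 := by push_cast; ring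
    rw [h, PySem.List.pyRange_one_succ_right (by omega), List.foldl_append, ih]
    simp [List.replicate_succ']; omega

-- intersperse with an empty separator is a no-op under flatten
theorem flatten_intersperse_nil {α : Type} (L : List (List α)) :
    (List.intersperse [] L).flatten = L.flatten := by
  induction L with
  | nil => rfl
  | cons x xs ih =>
    cases xs with
    | nil => rfl
    | cons y ys => simp [List.intersperse] at ih ⊢; simpa using ih

-- joining with "" concatenates the character lists
theorem join_empty (l : List String) :
    PySem.Str.join "" l = String.ofList (l.map String.toList).flatten := by
  simp [PySem.Str.join, PySem.Chars.join, List.intercalate, flatten_intersperse_nil]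

-- four consecutive characters starting at an index ≡ 1 (mod 4) spell one '_|__' cell
theorem map_cell (m : Int) (h : m % 4 = 1) :
    (PySem.List.pyRange m (m + 4) 1).map oddRowChar = "_|__".toList := by
  rw [PySem.List.pyRange_one_cons (by omega), PySem.List.pyRange_one_cons (by omega),
      PySem.List.pyRange_one_cons (by omega), PySem.List.pyRange_one_cons (by omega),
      PySem.List.pyRange_one_eq_nil (by omega)]
  simp only [List.map_cons, List.map_nil, oddRowChar,
    PySem.Int.mod_eq_emod_of_pos (b := 4) (by norm_num), beq_iff_eq]
  rw [if_neg (by omega), if_pos (by omega), if_neg (by omega), if_neg (by omega)]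
  rfl

-- B's per-character map equals A's cell decomposition
theorem alt_chars (n : Nat) :
    (PySem.List.pyRange 0 (4 * (1 + (n : Int)) + 1) 1).map oddRowChar
      = "__|__".toList ++ (List.replicate n ("_|__".toList)).flatten := by
  induction n with
  | zero => decide
  | succ k ih =>
    have hb : 4 * (1 + ((k + 1 : Nat) : Int)) + 1 = (4 * (1 + (k : Int)) + 1) + 4 := by
      push_cast; ring
    rw [hb, PySem.List.pyRange_one_append 0 (4 * (1 + (k : Int)) + 1) _ (by omega) (by omega),
        List.map_append, ih, map_cell _ (by omega), List.replicate_succ']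
    simp

theorem odd_row_eq (width : Int) : odd_row width = odd_row_alt width := by
  by_cases h : 0 < width
  · have hw : width = 1 + ((width - 1).toNat : Int) := by omega
    unfold odd_row odd_row_alt
    rw [if_neg (by omega)]
    rw [hw, PySem.List.pyRange_one_cons (by omega)]
    simp only [List.foldl_cons, List.nil_append,
      show ((0 : Int) == 0) = true from rfl, if_true,
      show (0 : Int) + 1 = 1 from rfl]
    rw [odd_row_loop_tail, join_empty, alt_chars]
    simp
  · unfold odd_row odd_row_alt
    rw [if_pos (by omega), PySem.List.pyRange_one_eq_nil (by omega)]
    simp [join_empty]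

-- ===== VERDICT (by name: the statement is the Claim_ definition above) =====
theorem odd_row_spec : Claim_equal_odd_row := by
  intro w _; exact odd_row_eq w
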